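-- pv_equiv track=rewrite | github.com/LennartvdM/Wyrd-Engine | engines/engine_mk2.py | _compute_duration
-- ===== SOURCE A (Python) =====
-- from typing import (
--     Any,
--     Callable,
--     Dict,
--     Iterable,
--     List,
--     Mapping,
--     MutableMapping,
--     Optional,
--     Sequence,
--     Set,
--     Tuple,
-- )
--
-- def _compute_duration(
--     start_minutes: Optional[int], end_minutes: Optional[int]
-- ) -> Optional[int]:
--     if start_minutes is None or end_minutes is None:
--         return None
--     if end_minutes > start_minutes:
--         return end_minutes - start_minutes
--     difference = end_minutes - start_minutes
--     while difference <= 0: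
--         difference += 1440
--         if difference > 14 * 1440:
--             return None
--     return difference
-- ===== SOURCE B (Python) =====
-- from typing import Optional
--
-- def _compute_duration(
--     start_minutes: Optional[int], end_minutes: Optional[int]
-- ) -> Optional[int]:
--     if start_minutes is None or end_minutes is None:
--         return None
--     if end_minutes > start_minutes:
--         return end_minutes - start_minutes
--     d = (end_minutes - start_minutes) % 1440
--     return 1440 if d == 0 else d
-- ===== Notes on version B (the rewrite author's own statement) =====
-- stated objective: simpler
-- what changed: Replaced the while-loop that repeatedly adds 1440 (with a dead 14-day cap) by a closed-form modular reduction: d = (end-start) % 1440, returning 1440 when d == 0.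
import Mathlib
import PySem

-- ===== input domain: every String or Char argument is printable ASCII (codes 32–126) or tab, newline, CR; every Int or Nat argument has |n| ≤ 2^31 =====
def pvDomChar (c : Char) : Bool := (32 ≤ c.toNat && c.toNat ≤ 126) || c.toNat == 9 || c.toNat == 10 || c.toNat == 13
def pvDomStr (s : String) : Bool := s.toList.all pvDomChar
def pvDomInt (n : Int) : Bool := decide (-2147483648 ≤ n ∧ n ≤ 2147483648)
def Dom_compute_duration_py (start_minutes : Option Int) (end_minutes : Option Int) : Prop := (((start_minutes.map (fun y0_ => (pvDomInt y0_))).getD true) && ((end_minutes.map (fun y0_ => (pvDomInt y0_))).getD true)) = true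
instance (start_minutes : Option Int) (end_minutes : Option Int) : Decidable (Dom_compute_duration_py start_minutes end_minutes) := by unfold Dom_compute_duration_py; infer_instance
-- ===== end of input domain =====

-- B replaces A's repeated-addition while-loop (whose 14-day cap is dead code) by a closed-form modular reduction; objective: simpler.


-- ===== PORT A =====
-- while-loop of A: 'while difference <= 0: difference += 1440; if difference > 14*1440: return None'
def pvLoopA (difference : Int) : Option Int :=
  if difference ≤ 0 then
    let d' := difference + 1440
    if d' > 14 * 1440 then none else pvLoopA d'
  else some difference
termination_by (1 - difference).toNat
decreasing_by omega

def compute_duration_py (start_minutes : Option Int) (end_minutes : Option Int) : Option Int :=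
  match start_minutes, end_minutes with
  | none, _ => none
  | _, none => none
  | some s, some e =>
    if e > s then some (e - s)
    else pvLoopA (e - s)

-- ===== PORT B =====
def compute_duration_py_alt (start_minutes : Option Int) (end_minutes : Option Int) : Option Int :=
  match start_minutes, end_minutes with
  | none, _ => none
  | _, none => none
  | some s, some e =>
    if e > s then some (e - s)
    else
      let d := PySem.Int.mod (e - s) 1440
      if d = 0 then some 1440 else some d

-- ===== PRECONDITION & SPEC =====
def Spec_compute_duration_py (start_minutes : Option Int) (end_minutes : Option Int) (out : Option Int) : Prop := out = compute_duration_py_alt start_minutes end_minutes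
instance (start_minutes : Option Int) (end_minutes : Option Int) (out : Option Int) : Decidable (Spec_compute_duration_py start_minutes end_minutes out) := by unfold Spec_compute_duration_py; infer_instance

-- ===== CLAIM (what is proved, stated in full; the proofs are below) =====
def Claim_equal_compute_duration_py : Prop := ∀ (start_minutes : Option Int) (end_minutes : Option Int), Dom_compute_duration_py start_minutes end_minutes → Spec_compute_duration_py start_minutes end_minutes (compute_duration_py start_minutes end_minutes)

-- ===== LEMMAS AND PROOFS =====

theorem pvLoopA_eq_aux (n : Nat) : ∀ d : Int, d ≤ 0 → (1 - d).toNat ≤ n →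
    pvLoopA d = (if d % 1440 = 0 then some 1440 else some (d % 1440)) := by
  induction n with
  | zero => intro d hd hn; omega
  | succ n ih =>
      intro d hd hn
      rw [pvLoopA]
      simp only [if_pos hd, if_neg (show ¬ d + 1440 > 14 * 1440 by omega)]
      by_cases h2 : d + 1440 ≤ 0
      · rw [ih (d + 1440) h2 (by omega)]
        have : (d + 1440) % 1440 = d % 1440 := by omega
        rw [this]
      · rw [pvLoopA]
        rw [if_neg h2]
        have hmod : d % 1440 = d + 1440 ∨ (d % 1440 = 0 ∧ d + 1440 = 1440) := by omega
        rcases hmod with h4 | ⟨h4, h5⟩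
        · rw [if_neg (by omega), h4]
        · rw [if_pos h4, h5]

theorem pvLoopA_eq (d : Int) (hd : d ≤ 0) :
    pvLoopA d = (if d % 1440 = 0 then some 1440 else some (d % 1440)) :=
  pvLoopA_eq_aux (1 - d).toNat d hd le_rfl

-- ===== VERDICT (by name: the statement is the Claim_ definition above) =====
theorem compute_duration_py_spec : Claim_equal_compute_duration_py := by
  intro s e _
  unfold Spec_compute_duration_py compute_duration_py compute_duration_py_alt
  match s, e with
  | none, _ => rfl
  | some a, none => rfl
  | some a, some b =>
    simp only []
    by_cases h : b > a
    · rw [if_pos h, if_pos h]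
    · rw [if_neg h, if_neg h]
      rw [pvLoopA_eq (b - a) (by omega)]
      rw [PySem.Int.mod_eq_emod_of_pos (by norm_num : (0:Int) < 1440)]
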